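-- pv_equiv track=rewrite | github.com/SSAFY-6th-SEOUL3/algorithm_study | programmers/조이스틱/by-gramm/s1.py | solution
-- ===== SOURCE A (Python) =====
-- def solution(name):
--     N = len(name)
--
--     # 각 알파벳에 대하여, 조이스틱을 몇 번 조작해야 하는지 구한다.
--     operations = [min(91 - ord(x), ord(x) - 65) for x in name]
--
--     # M: A가 아닌 알파벳의 개수
--     M = N - operations.count(0)
--     # idx: 현재 탐색중인 인덱스
--     # total: 총 조이스틱 조작 횟수
--     idx, total = 0, 0
--
--     # 시작 알파벳이 'A'가 아니면, 'A'로 만들어준다.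
--     if operations[0]:
--         total += operations[0]
--         operations[0] = 0
--         M -= 1
--
--     # 그리디: 매번 가장 가까이에 있는 위치로 이동하여, 알파벳을 완성한다. (M번 반복)
--     for _ in range(M):
--         i = 1
--         while True:
--             if operations[(idx - i) % N]:  # 왼쪽 경로 탐색
--                 idx = (idx - i) % N
--                 total += (i + operations[idx])
--                 operations[idx] = 0
--                 break
--             if operations[(idx + i) % N]:  # 오른쪽 경로 탐색
--                 idx = (idx + i) % N
--                 total += (i + operations[idx])
--                 operations[idx] = 0
--                 break
--             i += 1
--
--     return total
-- ===== SOURCE B (Python) =====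
-- def _bisect_left(a, x):
--     lo, hi = 0, len(a)
--     while lo < hi:
--         mid = (lo + hi) // 2
--         if a[mid] < x:
--             lo = mid + 1
--         else:
--             hi = mid
--     return lo
--
--
-- def solution(name):
--     n = len(name)
--     operations = [min(91 - ord(x), ord(x) - 65) for x in name]
--     # cost of fixing position 0 first (0 if no up/down moves are needed there)
--     total = operations[0]
--     # remaining positions to fix, in increasing order (position 0 is done)
--     ps = [p for p in range(1, n) if operations[p]]
--     idx = 0
--     while ps:
--         m = len(ps)
--         j = _bisect_left(ps, idx)
--         pred = ps[j - 1] if j else ps[m - 1]        # nearest remaining to the left (cyclic)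
--         succ = ps[j] if j < m else ps[0]            # nearest remaining to the right (cyclic)
--         ld = (idx - pred) % n
--         rd = (succ - idx) % n
--         if ld <= rd:                                # tie goes left, as in the greedy
--             total += ld + operations[pred]
--             idx = pred
--             del ps[(j - 1) if j else (m - 1)]
--         else:
--             total += rd + operations[succ]
--             idx = succ
--             del ps[j if j < m else 0]
--     return total
-- ===== Notes on version B (the rewrite author's own statement) =====
-- stated objective: alternative
-- what changed: replaces A's per-step expanding ring scan over the mutated operations array with a sorted list of the positions still needing up/down moves, locating the nearest remaining position on each side by binary search (hand-written bisect_left) and deleting the chosen one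
import Mathlib
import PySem

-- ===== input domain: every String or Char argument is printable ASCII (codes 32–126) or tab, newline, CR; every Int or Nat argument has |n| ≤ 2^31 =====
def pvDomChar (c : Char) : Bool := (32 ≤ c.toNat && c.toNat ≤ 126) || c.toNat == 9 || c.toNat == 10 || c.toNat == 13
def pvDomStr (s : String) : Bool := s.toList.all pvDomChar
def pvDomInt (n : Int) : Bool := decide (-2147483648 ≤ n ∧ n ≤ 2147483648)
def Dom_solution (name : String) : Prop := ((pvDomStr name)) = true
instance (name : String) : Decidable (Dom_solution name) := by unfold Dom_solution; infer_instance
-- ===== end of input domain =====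

-- B replaces A's per-step expanding ring scan with a sorted list of remaining positions
-- queried by binary search for the cyclic left/right neighbours (objective: alternative).

-- ===== PORT A =====
-- operations = [min(91 - ord(x), ord(x) - 65) for x in name]
def opsA (name : String) : List Int :=
  name.toList.map (fun x => min (91 - (x.toNat : Int)) ((x.toNat : Int) - 65))

-- the inner `while True` loop: returns (new idx, i) of the first hit; fuel = N is enough
-- whenever a nonzero entry remains (proved below); `none` = Python's infinite loop, unreachable
-- on every input the claim covers.
def scanA (ops : List Int) (n idx : Int) : Int → Nat → Option (Int × Int)
  | _, 0 => none
  | i, fuel+1 =>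
    let l := PySem.Int.mod (idx - i) n
    if ops.getD l.toNat 0 ≠ 0 then some (l, i)
    else
      let r := PySem.Int.mod (idx + i) n
      if ops.getD r.toNat 0 ≠ 0 then some (r, i)
      else scanA ops n idx (i+1) fuel

-- for _ in range(M): …
def loopA (n : Int) : Nat → List Int → Int → Int → Int
  | 0, _, _, total => total
  | m+1, ops, idx, total =>
    match scanA ops n idx 1 n.toNat with
    | none => total   -- unreachable: Python loops forever only when no nonzero entry remains
    | some (j, i) =>
      loopA n m (ops.set j.toNat 0) j (total + (i + ops.getD j.toNat 0))

def solution (name : String) : Int :=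
  let N : Int := PySem.Str.len name
  let ops := opsA name
  let M : Int := N - (PySem.List.count ops 0 : Int)
  match PySem.List.pyGet? ops 0 with
  | none => 0    -- operations[0]: IndexError on the empty string (outside Pre_)
  | some o0 =>
    if o0 ≠ 0 then loopA N (M - 1).toNat (ops.set 0 0) 0 o0
    else loopA N M.toNat ops 0 0

-- ===== PORT B =====
def opsB (name : String) : List Int :=
  name.toList.map (fun x => min (91 - (x.toNat : Int)) ((x.toNat : Int) - 65))

-- while ps: … (fuel = ps.length at the call; each pass deletes one element)
def loopB (n : Int) (ops : List Int) : Nat → List Int → Int → Int → Int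
  | 0, _, _, total => total
  | fuel+1, ps, idx, total =>
    if ps.isEmpty then total else
    let m := ps.length
    let j := PySem.List.bisectLeft ps idx
    let pred := if j ≠ 0 then ps.getD (j-1) 0 else ps.getD (m-1) 0
    let succ := if j < m then ps.getD j 0 else ps.getD 0 0
    let ld := PySem.Int.mod (idx - pred) n
    let rd := PySem.Int.mod (succ - idx) n
    if ld ≤ rd then
      loopB n ops fuel (ps.eraseIdx (if j ≠ 0 then j-1 else m-1)) pred
        (total + ld + ops.getD pred.toNat 0)
    else
      loopB n ops fuel (ps.eraseIdx (if j < m then j else 0)) succ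
        (total + rd + ops.getD succ.toNat 0)

def solution_alt (name : String) : Int :=
  let n : Int := PySem.Str.len name
  let ops := opsB name
  match PySem.List.pyGet? ops 0 with
  | none => 0    -- operations[0]: IndexError on the empty string (outside Pre_)
  | some o0 =>
    let ps := (PySem.List.pyRange 1 n 1).filter (fun p => ops.getD p.toNat 0 ≠ 0)
    loopB n ops ps.length ps 0 o0

-- ===== PRECONDITION & SPEC =====
-- Pre_ excludes only the empty string, on which A (and B) raise IndexError at operations[0].
def Pre_solution (name : String) : Prop := name ≠ ""
instance (name : String) : Decidable (Pre_solution name) := by unfold Pre_solution; infer_instance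
def pvWitness_solution : String := "BAC"

def Spec_solution (name : String) (out : Int) : Prop := out = solution_alt name
instance (name : String) (out : Int) : Decidable (Spec_solution name out) := by unfold Spec_solution; infer_instance

-- ===== CLAIM (what is proved, stated in full; the proofs are below) =====
def Claim_equal_solution : Prop := ∀ (name : String), Dom_solution name → Pre_solution name → Spec_solution name (solution name)


-- ===== LEMMAS AND PROOFS =====

-- Python `%` with a positive divisor, on operands below the divisor.
lemma pv_sub_mod_cases {n a b : Int} (hn : 0 < n) (ha0 : 0 ≤ a) (han : a < n)
    (hb0 : 0 ≤ b) (hbn : b < n) :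
    PySem.Int.mod (a - b) n = if b ≤ a then a - b else a - b + n := by
  rw [PySem.Int.mod_eq_emod_of_pos hn]
  split
  · exact Int.emod_eq_of_lt (by omega) (by omega)
  · have h2 : (a - b) % n = (a - b + n * 1) % n := by rw [Int.add_mul_emod_self_left]
    rw [h2, show a - b + n * 1 = a - b + n by ring]
    exact Int.emod_eq_of_lt (by omega) (by omega)

lemma pv_add_mod_cases {n a b : Int} (hn : 0 < n) (ha0 : 0 ≤ a) (han : a < n)
    (hb0 : 0 ≤ b) (hbn : b < n) :
    PySem.Int.mod (a + b) n = if a + b < n then a + b else a + b - n := by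
  rw [PySem.Int.mod_eq_emod_of_pos hn]
  split
  · exact Int.emod_eq_of_lt (by omega) (by omega)
  · have h2 : (a + b) % n = (a + b + n * (-1)) % n := by rw [Int.add_mul_emod_self_left]
    rw [h2, show a + b + n * (-1) = a + b - n by ring]
    exact Int.emod_eq_of_lt (by omega) (by omega)

-- walking left by the left-distance of q lands exactly on q
lemma pv_left_inv {n idx q : Int} (hn : 0 < n) (hi0 : 0 ≤ idx) (hin : idx < n)
    (hq0 : 0 ≤ q) (hqn : q < n) :
    PySem.Int.mod (idx - PySem.Int.mod (idx - q) n) n = q := by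
  rw [pv_sub_mod_cases hn hi0 hin hq0 hqn]
  split
  · rw [pv_sub_mod_cases hn hi0 hin (by omega) (by omega)]
    split <;> omega
  · rw [pv_sub_mod_cases hn hi0 hin (by omega) (by omega)]
    split <;> omega

-- walking right by the right-distance of q lands exactly on q
lemma pv_right_inv {n idx q : Int} (hn : 0 < n) (hi0 : 0 ≤ idx) (hin : idx < n)
    (hq0 : 0 ≤ q) (hqn : q < n) :
    PySem.Int.mod (idx + PySem.Int.mod (q - idx) n) n = q := by
  rw [pv_sub_mod_cases hn hq0 hqn hi0 hin]
  split
  · rw [pv_add_mod_cases hn hi0 hin (by omega) (by omega)]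
    split <;> omega
  · rw [pv_add_mod_cases hn hi0 hin (by omega) (by omega)]
    split <;> omega

-- one unfolding of the inner scan
lemma pv_scanA_succ (ops : List Int) (n idx i : Int) (f : Nat) :
    scanA ops n idx i (f+1) =
      if ops.getD (PySem.Int.mod (idx - i) n).toNat 0 ≠ 0 then
        some (PySem.Int.mod (idx - i) n, i)
      else if ops.getD (PySem.Int.mod (idx + i) n).toNat 0 ≠ 0 then
        some (PySem.Int.mod (idx + i) n, i)
      else scanA ops n idx (i+1) f := rfl

-- A's expanding ring scan returns the nearest active position, ties to the left.
lemma pv_scanA_eq {ops : List Int} {n idx pred succ L R : Int}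
    (hLpos : PySem.Int.mod (idx - L) n = pred)
    (hRpos : PySem.Int.mod (idx + R) n = succ)
    (hpred : ops.getD pred.toNat 0 ≠ 0)
    (hsucc : ops.getD succ.toNat 0 ≠ 0)
    (hminL : ∀ i : Int, 1 ≤ i → i < L → ops.getD (PySem.Int.mod (idx - i) n).toNat 0 = 0)
    (hminR : ∀ i : Int, 1 ≤ i → i < R → ops.getD (PySem.Int.mod (idx + i) n).toNat 0 = 0) :
    ∀ (fuel : Nat) (i : Int), 1 ≤ i → i ≤ L → i ≤ R → min L R < i + fuel →
    scanA ops n idx i fuel = if L ≤ R then some (pred, L) else some (succ, R) := by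
  intro fuel
  induction fuel with
  | zero => intro i h1 hiL hiR hf; simp only [Nat.cast_zero, add_zero] at hf; omega
  | succ f ih =>
    intro i h1 hiL hiR hf
    by_cases hl : ops.getD (PySem.Int.mod (idx - i) n).toNat 0 = 0
    · by_cases hr : ops.getD (PySem.Int.mod (idx + i) n).toNat 0 = 0
      · -- no hit at distance i: recurse
        have hiltL : i < L := by
          rcases lt_or_eq_of_le hiL with h | h
          · exact h
          · rw [h, hLpos] at hl; exact absurd hl hpred
        have hiltR : i < R := by
          rcases lt_or_eq_of_le hiR with h | h
          · exact h
          · rw [h, hRpos] at hr; exact absurd hr hsucc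
        rw [pv_scanA_succ, if_neg (not_ne_iff.mpr hl), if_neg (not_ne_iff.mpr hr)]
        exact ih (i+1) (by omega) (by omega) (by omega) (by omega)
      · -- right hit first possible only at i = R
        have hiltL : i < L := by
          rcases lt_or_eq_of_le hiL with h | h
          · exact h
          · rw [h, hLpos] at hl; exact absurd hl hpred
        have hiR' : i = R := by
          by_contra hne
          exact hr (hminR i h1 (by omega))
        rw [pv_scanA_succ, if_neg (not_ne_iff.mpr hl), if_pos hr, hiR', hRpos,
          if_neg (by omega)]
    · -- left hit: only possible at i = L
      have hiL' : i = L := by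
        by_contra hne
        exact hl (hminL i h1 (by omega))
      rw [pv_scanA_succ, if_pos hl, hiL', hLpos, if_pos (by omega)]

-- the invariant tying A's mutated `ops` to B's sorted list `ps` of remaining positions
def pvInv (n : Int) (ops0 ops ps : List Int) (idx : Int) : Prop :=
  (ops.length : Int) = n ∧
  ps.Pairwise (· < ·) ∧
  (∀ p ∈ ps, 0 ≤ p ∧ p < n) ∧
  (∀ p : Int, 0 ≤ p → p < n → (p ∈ ps ↔ ops.getD p.toNat 0 ≠ 0)) ∧
  (∀ p ∈ ps, ops.getD p.toNat 0 = ops0.getD p.toNat 0) ∧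
  0 ≤ idx ∧ idx < n ∧ idx ∉ ps

-- B's cyclic-left neighbour (found by bisect) minimizes the left distance
lemma pv_pred_min {ps : List Int} {n idx : Int}
    (hs : ps.Pairwise (· < ·)) (hb : ∀ p ∈ ps, 0 ≤ p ∧ p < n)
    (hi0 : 0 ≤ idx) (hin : idx < n) (hni : idx ∉ ps) (hne : ps ≠ []) :
    (if PySem.List.bisectLeft ps idx ≠ 0 then PySem.List.bisectLeft ps idx - 1
       else ps.length - 1) < ps.length ∧
    ps.getD (if PySem.List.bisectLeft ps idx ≠ 0 then PySem.List.bisectLeft ps idx - 1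
       else ps.length - 1) 0 ∈ ps ∧
    (∀ q ∈ ps,
      PySem.Int.mod (idx - ps.getD (if PySem.List.bisectLeft ps idx ≠ 0 then
          PySem.List.bisectLeft ps idx - 1 else ps.length - 1) 0) n ≤
        PySem.Int.mod (idx - q) n) := by
  have hlen : 0 < ps.length := List.length_pos_iff.mpr hne
  obtain ⟨hj, hlt, hge⟩ := PySem.List.bisectLeft_spec ps idx (hs.imp le_of_lt)
  set j := PySem.List.bisectLeft ps idx with hjdef
  have hmono : ∀ (a b : Nat) (ha : a < ps.length) (hb : b < ps.length), a ≤ b → ps[a] ≤ ps[b] := by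
    intro a b ha hb hab
    rcases Nat.lt_or_ge a b with h | h
    · exact le_of_lt ((List.pairwise_iff_getElem.mp hs) a b ha hb h)
    · have : a = b := by omega
      subst this; rfl
  have hgt : ∀ (k : Nat) (hk : k < ps.length), j ≤ k → idx < ps[k] := by
    intro k hk hjk
    rcases lt_or_eq_of_le (hge k hk hjk) with h | h
    · exact h
    · exact absurd (h ▸ List.getElem_mem hk) hni
  have hb' : ∀ (k : Nat) (hk : k < ps.length), 0 ≤ ps[k] ∧ ps[k] < n :=
    fun k hk => hb ps[k] (List.getElem_mem hk)
  by_cases hj0 : j ≠ 0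
  · -- pred = ps[j-1] < idx
    have hj1 : j - 1 < ps.length := by omega
    have hpred : ps.getD (j-1) 0 = ps[j-1] := List.getD_eq_getElem ps 0 hj1
    rw [if_pos hj0, hpred]
    have hplt : ps[j-1] < idx := hlt (j-1) hj1 (by omega)
    obtain ⟨hp0, hpn⟩ := hb' (j-1) hj1
    refine ⟨by omega, List.getElem_mem hj1, ?_⟩
    intro q hq
    obtain ⟨k, hk, rfl⟩ := List.mem_iff_getElem.mp hq
    obtain ⟨hq0, hqn⟩ := hb' k hk
    rw [pv_sub_mod_cases (by omega) hi0 hin hp0 hpn,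
        pv_sub_mod_cases (by omega) hi0 hin hq0 hqn]
    rcases Nat.lt_or_ge k j with h | h
    · have h2 := hlt k hk h
      have h3 := hmono k (j-1) hk hj1 (by omega)
      split_ifs <;> omega
    · have h2 := hgt k hk h
      split_ifs <;> omega
  · -- j = 0: everything is to the right of idx; pred = last element
    have hm1 : ps.length - 1 < ps.length := by omega
    have hpred : ps.getD (ps.length - 1) 0 = ps[ps.length - 1] := List.getD_eq_getElem ps 0 hm1
    rw [if_neg hj0, hpred]
    obtain ⟨hp0, hpn⟩ := hb' (ps.length - 1) hm1
    have hpgt : idx < ps[ps.length - 1] := hgt _ hm1 (by omega)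
    refine ⟨by omega, List.getElem_mem hm1, ?_⟩
    intro q hq
    obtain ⟨k, hk, rfl⟩ := List.mem_iff_getElem.mp hq
    obtain ⟨hq0, hqn⟩ := hb' k hk
    have hqgt : idx < ps[k] := hgt k hk (by omega)
    have h3 := hmono k (ps.length - 1) hk hm1 (by omega)
    rw [pv_sub_mod_cases (by omega) hi0 hin hp0 hpn,
        pv_sub_mod_cases (by omega) hi0 hin hq0 hqn]
    split_ifs <;> omega

-- B's cyclic-right neighbour minimizes the right distance
lemma pv_succ_min {ps : List Int} {n idx : Int}
    (hs : ps.Pairwise (· < ·)) (hb : ∀ p ∈ ps, 0 ≤ p ∧ p < n)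
    (hi0 : 0 ≤ idx) (hin : idx < n) (hni : idx ∉ ps) (hne : ps ≠ []) :
    (if PySem.List.bisectLeft ps idx < ps.length then PySem.List.bisectLeft ps idx
       else 0) < ps.length ∧
    ps.getD (if PySem.List.bisectLeft ps idx < ps.length then PySem.List.bisectLeft ps idx
       else 0) 0 ∈ ps ∧
    (∀ q ∈ ps,
      PySem.Int.mod (ps.getD (if PySem.List.bisectLeft ps idx < ps.length then
          PySem.List.bisectLeft ps idx else 0) 0 - idx) n ≤
        PySem.Int.mod (q - idx) n) := by
  have hlen : 0 < ps.length := List.length_pos_iff.mpr hne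
  obtain ⟨hj, hlt, hge⟩ := PySem.List.bisectLeft_spec ps idx (hs.imp le_of_lt)
  set j := PySem.List.bisectLeft ps idx with hjdef
  have hmono : ∀ (a b : Nat) (ha : a < ps.length) (hb : b < ps.length), a ≤ b → ps[a] ≤ ps[b] := by
    intro a b ha hb hab
    rcases Nat.lt_or_ge a b with h | h
    · exact le_of_lt ((List.pairwise_iff_getElem.mp hs) a b ha hb h)
    · have : a = b := by omega
      subst this; rfl
  have hgt : ∀ (k : Nat) (hk : k < ps.length), j ≤ k → idx < ps[k] := by
    intro k hk hjk
    rcases lt_or_eq_of_le (hge k hk hjk) with h | h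
    · exact h
    · exact absurd (h ▸ List.getElem_mem hk) hni
  have hb' : ∀ (k : Nat) (hk : k < ps.length), 0 ≤ ps[k] ∧ ps[k] < n :=
    fun k hk => hb ps[k] (List.getElem_mem hk)
  by_cases hjm : j < ps.length
  · -- succ = ps[j] > idx
    have hsucc : ps.getD j 0 = ps[j] := List.getD_eq_getElem ps 0 hjm
    rw [if_pos hjm, hsucc]
    have hsgt : idx < ps[j] := hgt j hjm (by omega)
    obtain ⟨hp0, hpn⟩ := hb' j hjm
    refine ⟨hjm, List.getElem_mem hjm, ?_⟩
    intro q hq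
    obtain ⟨k, hk, rfl⟩ := List.mem_iff_getElem.mp hq
    obtain ⟨hq0, hqn⟩ := hb' k hk
    rw [pv_sub_mod_cases (by omega) hp0 hpn hi0 hin,
        pv_sub_mod_cases (by omega) hq0 hqn hi0 hin]
    rcases Nat.lt_or_ge k j with h | h
    · have h2 := hlt k hk h
      split_ifs <;> omega
    · have h2 := hgt k hk h
      have h3 := hmono j k hjm hk h
      split_ifs <;> omega
  · -- j = length: everything is to the left of idx; succ = first element
    have hsucc : ps.getD 0 0 = ps[0] := List.getD_eq_getElem ps 0 hlen
    rw [if_neg hjm, hsucc]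
    obtain ⟨hp0, hpn⟩ := hb' 0 hlen
    have h0lt : ps[0] < idx := hlt 0 hlen (by omega)
    refine ⟨hlen, List.getElem_mem hlen, ?_⟩
    intro q hq
    obtain ⟨k, hk, rfl⟩ := List.mem_iff_getElem.mp hq
    obtain ⟨hq0, hqn⟩ := hb' k hk
    have hklt : ps[k] < idx := hlt k hk (by omega)
    have h3 := hmono 0 k hlen hk (by omega)
    rw [pv_sub_mod_cases (by omega) hp0 hpn hi0 hin,
        pv_sub_mod_cases (by omega) hq0 hqn hi0 hin]
    split_ifs <;> omega

-- removing the chosen position from ps matches zeroing it in ops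
lemma pv_inv_step {n : Int} {ops0 ops ps : List Int} {idx : Int}
    (hinv : pvInv n ops0 ops ps idx) {pj : Nat} (hpj : pj < ps.length) :
    pvInv n ops0 (ops.set (ps.getD pj 0).toNat 0) (ps.eraseIdx pj) (ps.getD pj 0) := by
  obtain ⟨hol, hsort, hbnd, hiff, horig, hi0, hin, hni⟩ := hinv
  have hnd : ps.Nodup := hsort.nodup
  have hget : ps.getD pj 0 = ps[pj] := List.getD_eq_getElem ps 0 hpj
  have hchb : 0 ≤ ps[pj] ∧ ps[pj] < n := hbnd ps[pj] (List.getElem_mem hpj)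
  have hmem' : ∀ x, x ∈ ps.eraseIdx pj ↔ (x ∈ ps ∧ x ≠ ps[pj]) := by
    intro x
    rw [List.mem_eraseIdx_iff_getElem]
    constructor
    · rintro ⟨i, hi, hipj, rfl⟩
      refine ⟨List.getElem_mem hi, ?_⟩
      intro he
      exact hipj (hnd.getElem_inj_iff.mp he)
    · rintro ⟨hx, hxne⟩
      obtain ⟨i, hi, rfl⟩ := List.mem_iff_getElem.mp hx
      exact ⟨i, hi, fun he => hxne (by subst he; rfl), rfl⟩
  have hchlen : ps[pj].toNat < ops.length := by omega
  have hset_same : (ops.set ps[pj].toNat 0).getD ps[pj].toNat 0 = 0 := by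
    rw [List.getD_eq_getElem?_getD, List.getElem?_set_self (by omega)]
    rfl
  have hset_ne : ∀ k : Nat, k ≠ ps[pj].toNat →
      (ops.set ps[pj].toNat 0).getD k 0 = ops.getD k 0 := by
    intro k hk
    rw [List.getD_eq_getElem?_getD, List.getD_eq_getElem?_getD,
      List.getElem?_set_ne (Ne.symm hk)]
  rw [hget]
  refine ⟨by rw [List.length_set]; exact hol,
    List.Pairwise.sublist (List.eraseIdx_sublist ps pj) hsort,
    fun p hp => hbnd p ((List.eraseIdx_sublist ps pj).subset hp),
    ?_, ?_, hchb.1, hchb.2, ?_⟩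
  · intro p hp0 hpn
    rw [hmem' p]
    by_cases hpe : p = ps[pj]
    · subst hpe
      simp only [hset_same]
      simp
    · have : p.toNat ≠ ps[pj].toNat := by omega
      rw [hset_ne p.toNat this]
      have := hiff p hp0 hpn
      tauto
  · intro p hp
    rw [hmem' p] at hp
    have : p.toNat ≠ ps[pj].toNat := by
      have h0 := hbnd p hp.1
      have := hp.2
      omega
    rw [hset_ne p.toNat this]
    exact horig p hp.1
  · intro hmem
    exact ((hmem' _).mp hmem).2 rfl

-- composing the two walks (right then measured back) is the identity
lemma pv_right_inv' {n idx i : Int} (hn : 0 < n) (hi0 : 0 ≤ idx) (hin : idx < n)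
    (hq0 : 0 ≤ i) (hqn : i < n) :
    PySem.Int.mod (PySem.Int.mod (idx + i) n - idx) n = i := by
  rw [pv_add_mod_cases hn hi0 hin hq0 hqn]
  split
  · rw [pv_sub_mod_cases hn (by omega) (by omega) hi0 hin]
    split <;> omega
  · rw [pv_sub_mod_cases hn (by omega) (by omega) hi0 hin]
    split <;> omega

lemma pv_loopA_succ {n : Int} {m : Nat} {ops : List Int} {idx total j i : Int}
    (hscan : scanA ops n idx 1 n.toNat = some (j, i)) :
    loopA n (m+1) ops idx total =
      loopA n m (ops.set j.toNat 0) j (total + (i + ops.getD j.toNat 0)) := by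
  show (match scanA ops n idx 1 n.toNat with
    | none => total
    | some (j, i) => loopA n m (ops.set j.toNat 0) j (total + (i + ops.getD j.toNat 0))) = _
  rw [hscan]

lemma pv_loop_eq {n : Int} (hn : 0 < n) (ops0 : List Int) :
    ∀ (m : Nat) (ops ps : List Int) (idx total : Int),
      pvInv n ops0 ops ps idx → ps.length = m →
      loopA n m ops idx total = loopB n ops0 m ps idx total := by
  intro m
  induction m with
  | zero => intro ops ps idx total _ _; rfl
  | succ m ih =>
    intro ops ps idx total hinv hlen
    obtain ⟨hol, hsort, hbnd, hiff, horig, hi0, hin, hni⟩ := hinv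
    have hne : ps ≠ [] := by intro h; subst h; simp at hlen
    have hEmpty : ps.isEmpty = false := by simp [hne]
    obtain ⟨hpj, hpmem, hpmin⟩ := pv_pred_min hsort hbnd hi0 hin hni hne
    obtain ⟨hsj, hsmem, hsmin⟩ := pv_succ_min hsort hbnd hi0 hin hni hne
    -- unfold one pass of B
    simp only [loopB, hEmpty, Bool.false_eq_true, if_false]
    have hpredeq : (if PySem.List.bisectLeft ps idx ≠ 0 then
          ps.getD (PySem.List.bisectLeft ps idx - 1) 0 else ps.getD (ps.length - 1) 0) =
        ps.getD (if PySem.List.bisectLeft ps idx ≠ 0 then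
          PySem.List.bisectLeft ps idx - 1 else ps.length - 1) 0 := by
      split_ifs <;> rfl
    have hsucceq : (if PySem.List.bisectLeft ps idx < ps.length then
          ps.getD (PySem.List.bisectLeft ps idx) 0 else ps.getD 0 0) =
        ps.getD (if PySem.List.bisectLeft ps idx < ps.length then
          PySem.List.bisectLeft ps idx else 0) 0 := by
      split_ifs <;> rfl
    rw [hpredeq, hsucceq]
    set pj := (if PySem.List.bisectLeft ps idx ≠ 0 then
      PySem.List.bisectLeft ps idx - 1 else ps.length - 1) with hpjdef
    set sj := (if PySem.List.bisectLeft ps idx < ps.length then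
      PySem.List.bisectLeft ps idx else 0) with hsjdef
    set pred := ps.getD pj 0 with hpreddef
    set succ := ps.getD sj 0 with hsuccdef
    set L := PySem.Int.mod (idx - pred) n with hLdef
    set R := PySem.Int.mod (succ - idx) n with hRdef
    obtain ⟨hp0, hpn⟩ := hbnd pred hpmem
    obtain ⟨hs0, hsn⟩ := hbnd succ hsmem
    have hpredne : pred ≠ idx := fun h => hni (h ▸ hpmem)
    have hsuccne : succ ≠ idx := fun h => hni (h ▸ hsmem)
    have hL1 : 1 ≤ L := by
      rw [hLdef, pv_sub_mod_cases hn hi0 hin hp0 hpn]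
      split_ifs <;> omega
    have hR1 : 1 ≤ R := by
      rw [hRdef, pv_sub_mod_cases hn hs0 hsn hi0 hin]
      split_ifs <;> omega
    have hLn : L < n := by rw [hLdef]; exact PySem.Int.mod_lt _ hn
    have hRn : R < n := by rw [hRdef]; exact PySem.Int.mod_lt _ hn
    have hLpos : PySem.Int.mod (idx - L) n = pred := by
      rw [hLdef]; exact pv_left_inv hn hi0 hin hp0 hpn
    have hRpos : PySem.Int.mod (idx + R) n = succ := by
      rw [hRdef]; exact pv_right_inv hn hi0 hin hs0 hsn
    have hpredop : ops.getD pred.toNat 0 ≠ 0 := (hiff pred hp0 hpn).mp hpmem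
    have hsuccop : ops.getD succ.toNat 0 ≠ 0 := (hiff succ hs0 hsn).mp hsmem
    have hminL : ∀ i : Int, 1 ≤ i → i < L →
        ops.getD (PySem.Int.mod (idx - i) n).toNat 0 = 0 := by
      intro i h1 hiL
      by_contra h0
      have hq0 : (0:Int) ≤ PySem.Int.mod (idx - i) n := PySem.Int.mod_nonneg _ hn
      have hqn : PySem.Int.mod (idx - i) n < n := PySem.Int.mod_lt _ hn
      have hqmem : PySem.Int.mod (idx - i) n ∈ ps := (hiff _ hq0 hqn).mpr h0
      have hmin := hpmin _ hqmem
      rw [pv_left_inv hn hi0 hin (by omega) (by omega)] at hmin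
      omega
    have hminR : ∀ i : Int, 1 ≤ i → i < R →
        ops.getD (PySem.Int.mod (idx + i) n).toNat 0 = 0 := by
      intro i h1 hiR
      by_contra h0
      have hq0 : (0:Int) ≤ PySem.Int.mod (idx + i) n := PySem.Int.mod_nonneg _ hn
      have hqn : PySem.Int.mod (idx + i) n < n := PySem.Int.mod_lt _ hn
      have hqmem : PySem.Int.mod (idx + i) n ∈ ps := (hiff _ hq0 hqn).mpr h0
      have hmin := hsmin _ hqmem
      rw [pv_right_inv' hn hi0 hin (by omega) (by omega)] at hmin
      omega
    have hfuel : min L R < 1 + (n.toNat : Int) := by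
      have : ((n.toNat : Nat) : Int) = n := Int.toNat_of_nonneg (by omega)
      omega
    have hscan := pv_scanA_eq hLpos hRpos hpredop hsuccop hminL hminR n.toNat 1
      le_rfl hL1 hR1 hfuel
    by_cases hLR : L ≤ R
    · rw [if_pos hLR] at hscan
      rw [pv_loopA_succ hscan, if_pos hLR]
      have htot : total + (L + ops.getD pred.toNat 0) = total + L + ops0.getD pred.toNat 0 := by
        rw [horig pred hpmem]; ring
      rw [htot, hpreddef]
      exact ih _ _ _ _
        (pv_inv_step ⟨hol, hsort, hbnd, hiff, horig, hi0, hin, hni⟩ hpj)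
        (by rw [List.length_eraseIdx, if_pos hpj]; omega)
    · rw [if_neg hLR] at hscan
      rw [pv_loopA_succ hscan, if_neg hLR]
      have htot : total + (R + ops.getD succ.toNat 0) = total + R + ops0.getD succ.toNat 0 := by
        rw [horig succ hsmem]; ring
      rw [htot, hsuccdef]
      exact ih _ _ _ _
        (pv_inv_step ⟨hol, hsort, hbnd, hiff, horig, hi0, hin, hni⟩ hsj)
        (by rw [List.length_eraseIdx, if_pos hsj]; omega)

-- counting active positions through an index range
lemma pv_countP_range : ∀ (l : List Int) (q : Int → Bool),
    (List.range l.length).countP (fun k => q (l.getD k 0)) = l.countP q := by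
  intro l
  induction l with
  | nil => intro q; rfl
  | cons a t iht =>
    intro q
    rw [List.length_cons, List.range_succ_eq_map, List.countP_cons, List.countP_map]
    have h1 : (List.countP ((fun k => q ((a :: t).getD k 0)) ∘ Nat.succ) (List.range t.length))
        = (List.range t.length).countP (fun k => q (t.getD k 0)) := by
      apply List.countP_congr
      intro k _
      rfl
    rw [h1, iht q, List.countP_cons]
    simp

theorem pv_main (name : String) (h : name ≠ "") : solution name = solution_alt name := by
  obtain ⟨c, t, hc⟩ : ∃ c t, name.toList = c :: t := by
    cases hct : name.toList with
    | nil => exact absurd (String.toList_eq_nil_iff.mp hct) h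
    | cons c t => exact ⟨c, t, rfl⟩
  have hops : opsA name =
      (min (91 - (c.toNat : Int)) ((c.toNat : Int) - 65)) ::
        t.map (fun x => min (91 - (x.toNat : Int)) ((x.toNat : Int) - 65)) := by
    rw [opsA, hc, List.map_cons]
  set o0 := min (91 - (c.toNat : Int)) ((c.toNat : Int) - 65) with ho0
  set tl := t.map (fun x => min (91 - (x.toNat : Int)) ((x.toNat : Int) - 65)) with htl
  have hopsB : opsB name = o0 :: tl := hops
  have hN : PySem.Str.len name = (tl.length : Int) + 1 := by
    rw [PySem.Str.len_eq, hc]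
    simp [htl]
  set n : Int := (tl.length : Int) + 1 with hn'
  have hn : 0 < n := by positivity
  -- the list of remaining positions B builds
  set ps := (PySem.List.pyRange 1 n 1).filter
    (fun p => decide ((o0 :: tl).getD p.toNat 0 ≠ 0)) with hps
  -- its length
  have hpslen : (ps.length : Int) = (tl.length : Int) - (List.count 0 tl : Int) := by
    rw [hps, ← List.countP_eq_length_filter, PySem.List.pyRange_one]
    have h2 : (n - 1).toNat = tl.length := by omega
    rw [List.countP_map, h2]
    have h3 : List.countP ((fun p => decide ((o0 :: tl).getD p.toNat 0 ≠ 0)) ∘ fun k : Nat => 1 + (k : Int))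
        (List.range tl.length) = List.countP (fun k : Nat => decide (tl.getD k 0 ≠ 0)) (List.range tl.length) := by
      apply List.countP_congr
      intro k _
      have h4 : (1 + (k : Int)).toNat = k + 1 := by omega
      simp only [Function.comp_apply, h4, List.getD_cons_succ]
    rw [h3, pv_countP_range tl (fun v => decide (v ≠ 0))]
    have h5 : tl.countP (fun v => decide (v ≠ 0)) = tl.countP (fun x => !(x == 0)) := by
      apply List.countP_congr
      intro v _
      simp
    have h6 : tl.countP (fun x => x == 0) + tl.countP (fun x => !(x == 0)) = tl.length := by
      simpa using (List.length_eq_countP_add_countP (p := fun x : Int => x == 0) (l := tl)).symm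
    rw [h5, List.count_eq_countP]
    omega
  -- initial invariant, for the zeroed first position
  have hinv : pvInv n (o0 :: tl) (0 :: tl) ps 0 := by
    refine ⟨by simp; rw [hn'], ?_, ?_, ?_, ?_, le_refl 0, by omega, ?_⟩
    · exact (PySem.List.pairwise_lt_pyRange_one 1 n).filter _
    · intro p hp
      have := (List.mem_filter.mp hp).1
      have := PySem.List.mem_pyRange_one.mp this
      omega
    · intro p hp0 hpn
      constructor
      · intro hp
        obtain ⟨hpr, hpd⟩ := List.mem_filter.mp hp
        have hp1 : 1 ≤ p := (PySem.List.mem_pyRange_one.mp hpr).1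
        have h4 : p.toNat = (p.toNat - 1) + 1 := by omega
        rw [h4, List.getD_cons_succ]
        rw [h4, List.getD_cons_succ] at hpd
        exact of_decide_eq_true hpd
      · intro hpd
        by_cases hp1 : 1 ≤ p
        · apply List.mem_filter.mpr
          refine ⟨PySem.List.mem_pyRange_one.mpr ⟨hp1, hpn⟩, ?_⟩
          have h4 : p.toNat = (p.toNat - 1) + 1 := by omega
          rw [h4, List.getD_cons_succ] at hpd ⊢
          exact decide_eq_true hpd
        · exfalso
          have hp0' : p = 0 := by omega
          rw [hp0'] at hpd
          simp at hpd
    · intro p hp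
      have hp1 : 1 ≤ p := (PySem.List.mem_pyRange_one.mp (List.mem_filter.mp hp).1).1
      have h4 : p.toNat = (p.toNat - 1) + 1 := by omega
      rw [h4, List.getD_cons_succ, List.getD_cons_succ]
    · intro hp
      have := (PySem.List.mem_pyRange_one.mp (List.mem_filter.mp hp).1).1
      omega
  -- unfold both programs
  show solution name = solution_alt name
  rw [solution, solution_alt]
  simp only [hops, hopsB, hN, PySem.List.pyGet?_zero_cons, PySem.List.count_eq]
  rw [← hps]
  by_cases h0 : o0 ≠ 0
  · rw [if_pos h0]
    have hM : ((tl.length : Int) + 1 - (List.count 0 (o0 :: tl) : Int) - 1).toNat = ps.length := by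
      rw [List.count_cons, if_neg (by simpa using h0)]
      omega
    rw [List.set_cons_zero, hM]
    exact pv_loop_eq hn (o0 :: tl) ps.length (0 :: tl) ps 0 o0 hinv rfl
  · rw [if_neg h0]
    have h0' : o0 = 0 := by omega
    have hM : ((tl.length : Int) + 1 - (List.count 0 (o0 :: tl) : Int)).toNat = ps.length := by
      rw [List.count_cons, if_pos (by simpa using h0')]
      omega
    rw [hM, h0']
    exact pv_loop_eq hn (0 :: tl) ps.length (0 :: tl) ps 0 0
      (by rw [h0'] at hinv; exact hinv) rfl

-- ===== VERDICT (by name: the statement is the Claim_ definition above) =====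
theorem solution_spec : Claim_equal_solution := by
  intro name _ hpre
  unfold Spec_solution
  exact pv_main name hpre
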